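-- pv_equiv track=rewrite | github.com/anhphan2705/CMPSC-131 | HW/Hangman/hard_hangman.py | match_no_match
-- ===== SOURCE A (Python) =====
-- def match_no_match(char, word_list):
--     """
--     Count the option of words that will match and will not match with the letter that is passed in
--
--     Param:
--     - char: a character that is chosen
--     - word_list: a list that was imported from outside containing words that could be used
--
--     Return:
--     - match_list: a list of words that would match with the selected letter
--     - no_match_list: a list of words that would not match with the selected letter
--     """
--     match_list = []
--     no_match_list = []
--     for word in word_list:
--         if char in word:
--             match_list.append(word)
--         else:
--             no_match_list.append(word)
--
--     return match_list, no_match_list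
-- ===== SOURCE B (Python) =====
-- def match_no_match(char, word_list):
--     # Divide and conquer: split the list in half, partition each half
--     # recursively, concatenate the per-half results (order is preserved).
--     if len(word_list) == 0:
--         return [], []
--     if len(word_list) == 1:
--         w = word_list[0]
--         return ([w], []) if char in w else ([], [w])
--     mid = len(word_list) // 2
--     lm, ln = match_no_match(char, word_list[:mid])
--     rm, rn = match_no_match(char, word_list[mid:])
--     return lm + rm, ln + rn
-- ===== Notes on version B (the rewrite author's own statement) =====
-- stated objective: alternative
-- what changed: Replaced A's single linear pass with dual append-accumulators by a divide-and-conquer recursion: split the list at the midpoint, partition each half recursively, and concatenate the two halves' results.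
import Mathlib
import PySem

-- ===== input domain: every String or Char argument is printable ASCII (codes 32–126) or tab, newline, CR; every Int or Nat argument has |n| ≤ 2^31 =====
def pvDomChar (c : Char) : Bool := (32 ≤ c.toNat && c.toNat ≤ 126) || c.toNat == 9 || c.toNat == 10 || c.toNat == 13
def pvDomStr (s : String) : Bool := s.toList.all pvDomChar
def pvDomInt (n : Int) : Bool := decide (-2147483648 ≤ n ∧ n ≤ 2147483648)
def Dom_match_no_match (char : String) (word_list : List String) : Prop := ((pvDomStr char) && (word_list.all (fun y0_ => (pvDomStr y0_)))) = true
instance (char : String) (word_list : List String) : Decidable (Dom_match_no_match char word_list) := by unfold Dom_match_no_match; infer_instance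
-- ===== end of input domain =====

-- B replaces A's single linear pass with dual appends by a midpoint divide-and-conquer
-- recursion that partitions each half and concatenates the results (alternative decomposition).

-- ===== PORT A =====
-- single pass, appending each word to one of two accumulators
def match_no_match (char : String) (word_list : List String) : List String × List String :=
  word_list.foldl
    (fun acc word =>
      if PySem.Str.isIn char word then (acc.1 ++ [word], acc.2)
      else (acc.1, acc.2 ++ [word]))
    ([], [])

-- ===== PORT B =====
-- divide and conquer: split at the midpoint, recurse on each half, concatenate.
-- word_list[:mid] / word_list[mid:] are List.take mid / List.drop mid (exact, 0 ≤ mid ≤ len).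
def match_no_match_alt (char : String) (word_list : List String) : List String × List String :=
  match word_list with
  | [] => ([], [])
  | [w] => if PySem.Str.isIn char w then ([w], []) else ([], [w])
  | x :: y :: rest =>
    let l := x :: y :: rest
    let mid := l.length / 2
    let L := match_no_match_alt char (l.take mid)
    let R := match_no_match_alt char (l.drop mid)
    (L.1 ++ R.1, L.2 ++ R.2)
termination_by word_list.length
decreasing_by
  · simp [List.length_take]; omega
  · simp [List.length_drop]; omega

-- ===== PRECONDITION & SPEC =====
def Spec_match_no_match (char : String) (word_list : List String) (out : List String × List String) : Prop := out = match_no_match_alt char word_list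
instance (char : String) (word_list : List String) (out : List String × List String) : Decidable (Spec_match_no_match char word_list out) := by unfold Spec_match_no_match; infer_instance

-- ===== CLAIM (what is proved, stated in full; the proofs are below) =====
def Claim_equal_match_no_match : Prop := ∀ (char : String) (word_list : List String), Dom_match_no_match char word_list → Spec_match_no_match char word_list (match_no_match char word_list)

-- ===== LEMMAS AND PROOFS =====

-- characterisation of B: the divide-and-conquer recursion computes the two filters
theorem match_no_match_alt_eq_filter (char : String) (word_list : List String) :
    match_no_match_alt char word_list
    = (word_list.filter (fun word => PySem.Str.isIn char word),
       word_list.filter (fun word => !PySem.Str.isIn char word)) := by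
  fun_induction match_no_match_alt char word_list with
  | case1 => simp
  | case2 w h =>
    simp [PySem.Str.isIn] at h; simp [h]
  | case3 w h =>
    simp [PySem.Str.isIn] at h; simp [h]
  | case4 x y rest l mid L R ihT ihD =>
    show ((match_no_match_alt char (List.take mid l)).1 ++ (match_no_match_alt char (List.drop mid l)).1,
          (match_no_match_alt char (List.take mid l)).2 ++ (match_no_match_alt char (List.drop mid l)).2) = _
    rw [ihT, ihD]
    rw [← List.filter_append, ← List.filter_append, List.take_append_drop]

-- loop invariant for A: the fold from accumulator (m, n) prepends m and n to the two filters
theorem match_no_match_foldl (char : String) (word_list : List String)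
    (m n : List String) :
    word_list.foldl
      (fun acc word =>
        if PySem.Str.isIn char word then (acc.1 ++ [word], acc.2)
        else (acc.1, acc.2 ++ [word]))
      (m, n)
    = (m ++ word_list.filter (fun word => PySem.Str.isIn char word),
       n ++ word_list.filter (fun word => !PySem.Str.isIn char word)) := by
  induction word_list generalizing m n with
  | nil => simp
  | cons w t ih =>
    rw [List.foldl_cons]
    by_cases h : PySem.Str.isIn char w
    · rw [if_pos h, ih]; simp [List.filter_cons]; simpa using h
    · rw [if_neg h, ih]; simp [List.filter_cons]; simpa using h

-- ===== VERDICT (by name: the statement is the Claim_ definition above) =====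
theorem match_no_match_spec : Claim_equal_match_no_match := by
  intro char word_list _
  show _ = _
  rw [match_no_match_alt_eq_filter]
  simpa [match_no_match] using match_no_match_foldl char word_list [] []
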